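-- pv_equiv track=rewrite | github.com/mmtitos/ML-DIGIVOLCAN | Dilated-LSTM/Auxiliar_Functions.py | Event_Limits2
-- ===== SOURCE A (Python) =====
-- def Event_Limits2(X_test):
--     list_of_events=list()
--     for i in range(len(X_test)):
--         event=list()
--         for j in range(len(X_test[i])-1):
--             if(X_test[i][j]!=X_test[i][j+1]):
--                 event.append(j+1)
--         list_of_events.append(event)
--     return list_of_events
-- ===== SOURCE B (Python) =====
-- def Event_Limits2(X_test):
--     # Runs-and-offsets: collect consecutive-equal run lengths, then emit the
--     # cumulative offset after every run except the last.
--     out = []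
--     for seq in X_test:
--         lengths = []
--         prev = None
--         for x in seq:
--             if lengths and x == prev:
--                 lengths[-1] += 1
--             else:
--                 lengths.append(1)
--             prev = x
--         bounds = []
--         total = 0
--         for L in lengths[:-1]:
--             total += L
--             bounds.append(total)
--         out.append(bounds)
--     return out
-- ===== Notes on version B (the rewrite author's own statement) =====
-- stated objective: idiomatic
-- what changed: B computes the run lengths of consecutive equal values and emits cumulative offsets of all runs but the last, instead of A's index-based pairwise neighbour comparison.
import Mathlib
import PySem

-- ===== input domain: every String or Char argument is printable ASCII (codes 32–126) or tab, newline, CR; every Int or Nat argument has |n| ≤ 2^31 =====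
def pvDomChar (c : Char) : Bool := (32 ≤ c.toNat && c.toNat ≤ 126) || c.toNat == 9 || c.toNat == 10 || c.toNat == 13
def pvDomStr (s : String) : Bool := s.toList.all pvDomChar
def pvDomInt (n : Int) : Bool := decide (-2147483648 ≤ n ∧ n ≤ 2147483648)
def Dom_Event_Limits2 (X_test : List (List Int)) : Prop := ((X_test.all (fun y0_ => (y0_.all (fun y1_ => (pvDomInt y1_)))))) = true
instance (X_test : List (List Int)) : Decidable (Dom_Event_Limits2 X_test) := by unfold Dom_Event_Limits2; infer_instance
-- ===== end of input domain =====

-- B replaces A's pairwise neighbour comparison by a runs-and-cumulative-offsets pass (idiomatic restructuring, same cost).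


-- ===== PORT A =====
-- A: for each sequence, scan index pairs (j, j+1) and record j+1 at each inequality.
def Event_Limits2 (X_test : List (List Int)) : List (List Int) :=
  (PySem.List.pyRange 0 (X_test.length : Int) 1).foldl (fun list_of_events i =>
    let row := PySem.List.pyGetD X_test i []
    let event := (PySem.List.pyRange 0 ((row.length : Int) - 1) 1).foldl (fun event j =>
      if PySem.List.pyGetD row j 0 ≠ PySem.List.pyGetD row (j + 1) 0 then event ++ [j + 1]
      else event) ([] : List Int)
    list_of_events ++ [event]) ([] : List (List Int))

-- ===== PORT B =====
-- B, pass 1: run lengths of consecutive equal values ('lengths' loop of Source B;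
-- written as structural recursion on the rest of the sequence, carrying prev and
-- the current run length).
def pvRunLens (prev : Int) (cur : Int) : List Int → List Int
  | [] => [cur]
  | y :: ys => if y = prev then pvRunLens y (cur + 1) ys else cur :: pvRunLens y 1 ys

def pvRowLens : List Int → List Int
  | [] => []
  | x :: xs => pvRunLens x 1 xs

-- B, pass 2: cumulative offsets of all run lengths but the last ('bounds' loop of Source B).
def pvBoundsRow (lens : List Int) : List Int :=
  (lens.dropLast.foldl (fun (st : Int × List Int) L => (st.1 + L, st.2 ++ [st.1 + L]))
    ((0 : Int), ([] : List Int))).2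

def Event_Limits2_alt (X_test : List (List Int)) : List (List Int) :=
  X_test.map (fun seq => pvBoundsRow (pvRowLens seq))

-- ===== PRECONDITION & SPEC =====
def Spec_Event_Limits2 (X_test : List (List Int)) (out : List (List Int)) : Prop := out = Event_Limits2_alt X_test
instance (X_test : List (List Int)) (out : List (List Int)) : Decidable (Spec_Event_Limits2 X_test out) := by unfold Spec_Event_Limits2; infer_instance

-- ===== CLAIM (what is proved, stated in full; the proofs are below) =====
def Claim_equal_Event_Limits2 : Prop := ∀ (X_test : List (List Int)), Dom_Event_Limits2 X_test → Spec_Event_Limits2 X_test (Event_Limits2 X_test)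

-- ===== LEMMAS AND PROOFS =====

-- Reference value of one row: boundary p is emitted at the first unequal pair, etc.
def refFrom (p : Int) : List Int → List Int
  | [] => []
  | [_] => []
  | a :: b :: t => (if a ≠ b then [p] else []) ++ refFrom (p + 1) (b :: t)

-- running prefix sums (what B's second loop appends)
def scanSums (total : Int) : List Int → List Int
  | [] => []
  | L :: ls => (total + L) :: scanSums (total + L) ls

theorem foldl_scanSums (lens : List Int) : ∀ (total : Int) (acc : List Int),
    (lens.foldl (fun (st : Int × List Int) L => (st.1 + L, st.2 ++ [st.1 + L])) (total, acc)).2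
      = acc ++ scanSums total lens := by
  induction lens with
  | nil => intro total acc; simp [scanSums]
  | cons L ls ih => intro total acc; simp [List.foldl, scanSums, ih]

theorem pvRunLens_ne_nil (prev cur : Int) (ys : List Int) : pvRunLens prev cur ys ≠ [] := by
  induction ys generalizing prev cur with
  | nil => simp [pvRunLens]
  | cons y ys ih => simp only [pvRunLens]; split <;> simp [ih]

theorem runLens_ref (ys : List Int) : ∀ (prev cur acc : Int),
    scanSums acc (pvRunLens prev cur ys).dropLast = refFrom (acc + cur) (prev :: ys) := by
  induction ys with
  | nil => intro prev cur acc; simp [pvRunLens, refFrom, scanSums]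
  | cons y ys ih =>
    intro prev cur acc
    by_cases h : y = prev
    · subst h
      simp only [pvRunLens, if_true]
      rw [ih y (cur + 1) acc, ← add_assoc]
      simp [refFrom]
    · simp only [pvRunLens, if_neg h]
      rw [List.dropLast_cons_of_ne_nil (pvRunLens_ne_nil y 1 ys)]
      simp only [scanSums]
      rw [ih y 1 (acc + cur)]
      have hne : prev ≠ y := fun hh => h hh.symm
      simp [refFrom, hne, add_assoc]

theorem rowB_ref (row : List Int) : pvBoundsRow (pvRowLens row) = refFrom 1 row := by
  cases row with
  | nil => simp [pvRowLens, pvBoundsRow, refFrom]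
  | cons x xs =>
    simp only [pvRowLens, pvBoundsRow]
    rw [foldl_scanSums]
    have := runLens_ref xs x 1 0
    simpa using this

-- A's inner loop as a flatMap over Nat indices
theorem rowA_flat (row : List Int) :
    ((PySem.List.pyRange 0 ((row.length : Int) - 1) 1).foldl (fun event j =>
      if PySem.List.pyGetD row j 0 ≠ PySem.List.pyGetD row (j + 1) 0 then event ++ [j + 1]
      else event) ([] : List Int))
      = (List.range (row.length - 1)).flatMap (fun k =>
          if row.getD k 0 ≠ row.getD (k + 1) 0 then [(1 : Int) + (k : Int)] else []) := by
  rw [PySem.List.pyRange_one]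
  have hn : (((row.length : Int) - 1) - 0).toNat = row.length - 1 := by omega
  rw [hn, List.foldl_map]
  have hbody : ∀ (acc : List Int) (k : Nat), k ∈ List.range (row.length - 1) →
      (if PySem.List.pyGetD row ((0 : Int) + (k : Int)) 0 ≠ PySem.List.pyGetD row ((0 : Int) + (k : Int) + 1) 0
        then acc ++ [(0 : Int) + (k : Int) + 1] else acc)
      = acc ++ (if row.getD k 0 ≠ row.getD (k + 1) 0 then [(1 : Int) + (k : Int)] else []) := by
    intro acc k _
    have h1 : (0 : Int) + (k : Int) = ((k : Nat) : Int) := by omega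
    have h2 : ((k : Nat) : Int) + 1 = (((k + 1 : Nat)) : Int) := by push_cast; ring
    rw [h1, h2, PySem.List.pyGetD_natCast, PySem.List.pyGetD_natCast]
    split <;> simp [add_comm]
  have hstep : List.foldl (fun (event : List Int) (k : Nat) =>
      if PySem.List.pyGetD row ((0 : Int) + (k : Int)) 0 ≠ PySem.List.pyGetD row ((0 : Int) + (k : Int) + 1) 0
      then event ++ [(0 : Int) + (k : Int) + 1] else event) [] (List.range (row.length - 1))
      = List.foldl (fun (event : List Int) (k : Nat) =>
          event ++ (if row.getD k 0 ≠ row.getD (k + 1) 0 then [(1 : Int) + (k : Int)] else []))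
          [] (List.range (row.length - 1)) :=
    PySem.List.foldl_congr_mem _ _ _ _ hbody
  rw [hstep, PySem.List.foldl_append_eq_flatMap]
  simp

theorem flat_ref (row : List Int) : ∀ (p : Int),
    (List.range (row.length - 1)).flatMap (fun k =>
        if row.getD k 0 ≠ row.getD (k + 1) 0 then [p + (k : Int)] else [])
      = refFrom p row := by
  induction row with
  | nil => intro p; simp [refFrom]
  | cons a t ih =>
    intro p
    cases t with
    | nil => simp [refFrom]
    | cons b t' =>
      have hlen : (a :: b :: t').length - 1 = t'.length + 1 := by simp
      rw [hlen, List.range_succ_eq_map, List.flatMap_cons, List.flatMap_map]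
      have hrest : List.flatMap (fun (k : Nat) =>
          if (a :: b :: t').getD k.succ 0 ≠ (a :: b :: t').getD (k.succ + 1) 0
          then [p + (k.succ : Int)] else []) (List.range t'.length)
          = refFrom (p + 1) (b :: t') := by
        rw [← ih (p + 1)]
        have hl : (b :: t').length - 1 = t'.length := by simp
        rw [hl]
        congr 1
        funext k
        simp only [Nat.succ_eq_add_one, List.getD_cons_succ]
        split
        · simp only [List.cons.injEq, and_true]; push_cast; ring
        · rfl
      rw [hrest]
      simp [refFrom]

theorem Event_Limits2_eq_map (X_test : List (List Int)) :
    Event_Limits2 X_test = X_test.map (fun row => refFrom 1 row) := by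
  simp only [Event_Limits2]
  rw [PySem.List.foldl_append_singleton_eq_map]
  have : ((PySem.List.pyRange 0 (X_test.length : Int) 1).map (fun i => PySem.List.pyGetD X_test i []))
      = X_test := PySem.List.map_pyGetD_pyRange_zero X_test []
  calc (PySem.List.pyRange 0 (X_test.length : Int) 1).map (fun i =>
        (PySem.List.pyRange 0 (((PySem.List.pyGetD X_test i []).length : Int) - 1) 1).foldl (fun event j =>
          if PySem.List.pyGetD (PySem.List.pyGetD X_test i []) j 0 ≠ PySem.List.pyGetD (PySem.List.pyGetD X_test i []) (j + 1) 0
          then event ++ [j + 1] else event) ([] : List Int))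
      = ((PySem.List.pyRange 0 (X_test.length : Int) 1).map (fun i => PySem.List.pyGetD X_test i [])).map
          (fun row => (PySem.List.pyRange 0 ((row.length : Int) - 1) 1).foldl (fun event j =>
            if PySem.List.pyGetD row j 0 ≠ PySem.List.pyGetD row (j + 1) 0 then event ++ [j + 1]
            else event) ([] : List Int)) := by rw [List.map_map]; rfl
    _ = X_test.map (fun row => refFrom 1 row) := by
          rw [this]; apply List.map_congr_left; intro row _
          rw [rowA_flat, flat_ref]

-- ===== VERDICT (by name: the statement is the Claim_ definition above) =====
theorem Event_Limits2_spec : Claim_equal_Event_Limits2 := by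
  intro X_test _
  unfold Spec_Event_Limits2 Event_Limits2_alt
  rw [Event_Limits2_eq_map]
  apply List.map_congr_left
  intro row _
  rw [rowB_ref]
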